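-- pv_equiv track=rewrite | github.com/LexMed-AI/Whisper---Streamlit | streamlit_app.py | prepare_pdf_content
-- ===== SOURCE A (Python) =====
-- def prepare_pdf_content(srt_text):
--     content = []
--     current_page = []
--     y_position = 750
--     for line in srt_text.split('\n'):
--         if not line.strip().isdigit() and line.strip() != '':
--             current_page.append((line, y_position))
--             y_position -= 15
--             if y_position < 72:
--                 content.append(current_page)
--                 current_page = []
--                 y_position = 750
--     if current_page:
--         content.append(current_page)
--     return content
-- ===== SOURCE B (Python) =====
-- def prepare_pdf_content(srt_text):
--     lines = [l for l in srt_text.split('\n') if l.strip() != '' and not l.strip().isdigit()]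
--     content = []
--     while lines:
--         chunk, lines = lines[:46], lines[46:]
--         content.append([(line, 750 - 15 * j) for j, line in enumerate(chunk)])
--     return content
-- ===== Notes on version B (the rewrite author's own statement) =====
-- stated objective: simpler
-- what changed: B replaces A's single interleaved accumulate-and-break loop carrying (content, current_page, y_position) state with three separate passes: filter the kept lines, split them into fixed 46-line chunks, and position each chunk's lines by the closed formula 750 - 15*j.
import Mathlib
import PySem

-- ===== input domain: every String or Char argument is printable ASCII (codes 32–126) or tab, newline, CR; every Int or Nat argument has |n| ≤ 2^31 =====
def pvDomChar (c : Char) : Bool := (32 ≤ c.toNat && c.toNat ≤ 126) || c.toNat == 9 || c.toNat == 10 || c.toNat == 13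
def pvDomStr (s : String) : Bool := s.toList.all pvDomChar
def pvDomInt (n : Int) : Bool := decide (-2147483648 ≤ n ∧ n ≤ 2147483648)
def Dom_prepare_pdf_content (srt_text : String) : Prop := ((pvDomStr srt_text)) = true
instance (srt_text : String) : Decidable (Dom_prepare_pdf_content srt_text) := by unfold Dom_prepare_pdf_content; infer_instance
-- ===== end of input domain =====

-- B paginates by filtering the kept lines, chunking into fixed 46-line pages and positioning by 750-15*j,
-- instead of A's single stateful accumulate-and-break loop (objective: simpler).

-- ===== PORT A =====
-- A's loop body; state = (content, current_page, y_position)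
def pvStepA (st : List (List (String × Int)) × List (String × Int) × Int) (line : String) :
    List (List (String × Int)) × List (String × Int) × Int :=
  if ¬ PySem.Str.strIsdigit (PySem.Str.strip line) ∧ PySem.Str.strip line ≠ "" then
    let current_page := st.2.1 ++ [(line, st.2.2)]
    let y_position := st.2.2 - 15
    if y_position < 72 then (st.1 ++ [current_page], [], 750)
    else (st.1, current_page, y_position)
  else st

def prepare_pdf_content (srt_text : String) : List (List (String × Int)) :=
  -- split? "\n" is total here ("\n" ≠ "")
  let st := ((PySem.Str.split? srt_text "\n").getD []).foldl pvStepA ([], [], 750)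
  if st.2.1 ≠ [] then st.1 ++ [st.2.1] else st.1

-- ===== PORT B =====
-- the list comprehension [(line, 750 - 15*j) for j, line in enumerate(chunk)]
def pvPlace (chunk : List String) : List (String × Int) :=
  (PySem.List.enumerate chunk).map (fun p => (p.2, 750 - 15 * p.1))

-- the 'while lines: chunk, lines = lines[:46], lines[46:]' loop
def pvChunks : List String → List (List (String × Int))
  | [] => []
  | l :: ls => pvPlace ((l :: ls).take 46) :: pvChunks ((l :: ls).drop 46)
  termination_by xs => xs.length
  decreasing_by simp

def prepare_pdf_content_alt (srt_text : String) : List (List (String × Int)) :=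
  let lines := ((PySem.Str.split? srt_text "\n").getD []).filter
    (fun l => PySem.Str.strip l ≠ "" && ¬ PySem.Str.strIsdigit (PySem.Str.strip l))
  pvChunks lines

-- ===== PRECONDITION & SPEC =====
def Spec_prepare_pdf_content (srt_text : String) (out : List (List (String × Int))) : Prop := out = prepare_pdf_content_alt srt_text
instance (srt_text : String) (out : List (List (String × Int))) : Decidable (Spec_prepare_pdf_content srt_text out) := by unfold Spec_prepare_pdf_content; infer_instance

-- ===== CLAIM (what is proved, stated in full; the proofs are below) =====
def Claim_equal_prepare_pdf_content : Prop := ∀ (srt_text : String), Dom_prepare_pdf_content srt_text → Spec_prepare_pdf_content srt_text (prepare_pdf_content srt_text)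

-- ===== LEMMAS AND PROOFS =====

-- index-carrying form of pvPlace's comprehension, convenient for induction
def pvPlaceAux : List String → Int → List (String × Int)
  | [], _ => []
  | l :: ls, i => (l, 750 - 15 * i) :: pvPlaceAux ls (i + 1)

theorem pvPlaceAux_eq_enum (chunk : List String) (i : Int) :
    pvPlaceAux chunk i = (PySem.List.enumerate chunk i).map (fun p => (p.2, 750 - 15 * p.1)) := by
  induction chunk generalizing i with
  | nil => simp [pvPlaceAux, PySem.List.enumerate_nil]
  | cons l ls ih => simp [pvPlaceAux, PySem.List.enumerate_cons, ih]

theorem pvPlace_eq_aux (chunk : List String) : pvPlace chunk = pvPlaceAux chunk 0 := by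
  rw [pvPlace, pvPlaceAux_eq_enum]

theorem pvPlaceAux_length (chunk : List String) (i : Int) :
    (pvPlaceAux chunk i).length = chunk.length := by
  induction chunk generalizing i with
  | nil => rfl
  | cons l ls ih => simp [pvPlaceAux, ih]

theorem pvPlaceAux_append (a b : List String) (i : Int) :
    pvPlaceAux (a ++ b) i = pvPlaceAux a i ++ pvPlaceAux b (i + a.length) := by
  induction a generalizing i with
  | nil => simp [pvPlaceAux]
  | cons l ls ih =>
    simp only [List.cons_append, pvPlaceAux, ih, List.length_cons]
    congr 2
    push_cast; ring

-- loop body of A with the filter condition already true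
def pvStepT (st : List (List (String × Int)) × List (String × Int) × Int) (line : String) :
    List (List (String × Int)) × List (String × Int) × Int :=
  let current_page := st.2.1 ++ [(line, st.2.2)]
  let y := st.2.2 - 15
  if y < 72 then (st.1 ++ [current_page], [], 750)
  else (st.1, current_page, y)

theorem pvFold_eq_filter (xs : List String) (st : List (List (String × Int)) × List (String × Int) × Int) :
    xs.foldl pvStepA st =
      (xs.filter (fun l => PySem.Str.strip l ≠ "" && ¬ PySem.Str.strIsdigit (PySem.Str.strip l))).foldl
        pvStepT st := by
  induction xs generalizing st with
  | nil => rfl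
  | cons l ls ih =>
    by_cases h : PySem.Str.strip l ≠ "" ∧ ¬ PySem.Str.strIsdigit (PySem.Str.strip l)
    · rw [List.foldl_cons, List.filter_cons_of_pos
        (by simp only [Bool.and_eq_true, decide_eq_true_eq, ne_eq]; exact ⟨h.1, h.2⟩), List.foldl_cons, ih]
      congr 1
      rw [pvStepA, if_pos ⟨h.2, h.1⟩]; rfl
    · rw [List.foldl_cons, List.filter_cons_of_neg
        (by simp only [Bool.and_eq_true, decide_eq_true_eq, ne_eq]; tauto), ih]
      congr 1
      rw [pvStepA, if_neg (by tauto)]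

-- A's fold over the filtered lines, as a page-building recursion
def pvBuild : List (String × Int) → List String → List (List (String × Int)) × List (String × Int)
  | page, [] => ([], page)
  | page, l :: ls =>
    let page' := page ++ [(l, 750 - 15 * (page.length : Int))]
    if page'.length = 46 then
      let r := pvBuild [] ls
      (page' :: r.1, r.2)
    else
      let r := pvBuild page' ls
      (r.1, r.2)

theorem pvFold_build (xs : List String) (content : List (List (String × Int)))
    (page : List (String × Int)) (h : page.length ≤ 45) :
    xs.foldl pvStepT (content, page, 750 - 15 * (page.length : Int)) =
      (content ++ (pvBuild page xs).1, (pvBuild page xs).2,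
        750 - 15 * (((pvBuild page xs).2.length : Int))) := by
  induction xs generalizing content page with
  | nil => simp [pvBuild]
  | cons l ls ih =>
    rw [List.foldl_cons]
    by_cases h46 : page.length = 45
    · have hstep : pvStepT (content, page, 750 - 15 * (page.length : Int)) l
          = (content ++ [page ++ [(l, 750 - 15 * (page.length : Int))]], [], 750) := by
        rw [pvStepT]
        simp only [h46]
        norm_num
      rw [hstep]
      have hih := ih (content ++ [page ++ [(l, 750 - 15 * (page.length : Int))]]) [] (by simp)
      norm_num at hih
      rw [hih]
      simp only [pvBuild]
      rw [if_pos (by simp [h46])]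
      try simp
    · have hlt : page.length ≤ 44 := by omega
      have hstep : pvStepT (content, page, 750 - 15 * (page.length : Int)) l
          = (content, page ++ [(l, 750 - 15 * (page.length : Int))],
              750 - 15 * (((page ++ [(l, 750 - 15 * (page.length : Int))]).length : Int))) := by
        rw [pvStepT]
        have : ¬ (750 - 15 * (page.length : Int) - 15 < 72) := by
          have : (page.length : Int) ≤ 44 := by exact_mod_cast hlt
          omega
        simp only [this, if_false]
        simp
        push_cast
        ring
      rw [hstep, ih _ _ (by simp; omega)]
      simp only [pvBuild]
      rw [if_neg (by simp; omega)]

theorem pvBuild_chunks (xs : List String) (pref : List String) (h : pref.length ≤ 45) :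
    (pvBuild (pvPlaceAux pref 0) xs).1 ++
        (if (pvBuild (pvPlaceAux pref 0) xs).2 ≠ [] then [(pvBuild (pvPlaceAux pref 0) xs).2] else []) =
      pvChunks (pref ++ xs) := by
  induction xs generalizing pref with
  | nil =>
    simp only [pvBuild, List.append_nil]
    rcases pref with _ | ⟨p, ps⟩
    · simp [pvPlaceAux, pvChunks]
    · have hne : pvPlaceAux (p :: ps) 0 ≠ [] := by simp [pvPlaceAux]
      rw [if_pos hne]
      rw [pvChunks]
      have hlen : (p :: ps).length ≤ 46 := le_trans h (by norm_num)
      rw [List.take_of_length_le hlen, List.drop_of_length_le hlen]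
      simp [pvChunks, pvPlace_eq_aux]
  | cons l ls ih =>
    have hsnoc : pvPlaceAux pref 0 ++ [(l, 750 - 15 * ((pvPlaceAux pref 0).length : Int))]
        = pvPlaceAux (pref ++ [l]) 0 := by
      rw [pvPlaceAux_append]
      simp [pvPlaceAux, pvPlaceAux_length]
    by_cases h45 : pref.length = 45
    · simp only [pvBuild]
      rw [if_pos (by simp [pvPlaceAux_length, h45])]
      simp only [ne_eq]
      have := ih ([] : List String) (by simp)
      simp only [pvPlaceAux, List.nil_append] at this
      have hch : pvChunks (pref ++ l :: ls) = pvPlaceAux (pref ++ [l]) 0 :: pvChunks ls := by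
        have hx : pref ++ l :: ls = (pref ++ [l]) ++ ls := by simp
        rcases pref with _ | ⟨p, ps⟩
        · simp at h45
        · rw [hx]
          have hlen : ((p :: ps) ++ [l]).length = 46 := by simp at h45 ⊢; omega
          rw [show ((p :: ps) ++ [l]) ++ ls = p :: (ps ++ [l] ++ ls) by simp]
          rw [pvChunks]
          congr 1
          · rw [pvPlace_eq_aux]
            congr 1
            have : p :: (ps ++ [l] ++ ls) = ((p :: ps) ++ [l]) ++ ls := by simp
            rw [this, List.take_append_of_le_length (by omega), List.take_of_length_le (by omega)]
          · have : p :: (ps ++ [l] ++ ls) = ((p :: ps) ++ [l]) ++ ls := by simp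
            rw [this, List.drop_append_of_le_length (by omega), List.drop_of_length_le (by omega)]
            simp
      rw [hch]
      simp only [List.cons_append]
      rw [← this]
      simp only [ne_eq, hsnoc]
    · have hle : pref.length ≤ 44 := by omega
      simp only [pvBuild]
      rw [if_neg (by simp [pvPlaceAux_length]; omega)]
      have := ih (pref ++ [l]) (by simp; omega)
      rw [hsnoc]
      rw [show pref ++ l :: ls = (pref ++ [l]) ++ ls by simp] 
      exact this

-- ===== VERDICT (by name: the statement is the Claim_ definition above) =====
theorem prepare_pdf_content_spec : Claim_equal_prepare_pdf_content := by
  intro s _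
  unfold Spec_prepare_pdf_content prepare_pdf_content prepare_pdf_content_alt
  rw [pvFold_eq_filter]
  rw [show (750 : Int) = 750 - 15 * ((([] : List (String × Int))).length : Int) from by simp]
  rw [pvFold_build _ _ _ (by simp)]
  have hb := pvBuild_chunks (((PySem.Str.split? s "\n").getD []).filter
      (fun l => PySem.Str.strip l ≠ "" && ¬ PySem.Str.strIsdigit (PySem.Str.strip l))) [] (by simp)
  simp only [pvPlaceAux, List.nil_append] at hb
  rw [← hb]
  split_ifs <;> simp_all
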